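-- pv_equiv track=rewrite | github.com/mariyaviswa/DataStructures-and-Algorithms | binary_search_string.py | binary_search_string
-- ===== SOURCE A (Python) =====
-- def binary_search_string(names, target):
--     names.sort()
--     if len(names) == 0:
--         return False
--
--     middle = ((len(names)) - 1) // 2
--     if names[middle] == target:
--         return True
--
--     if names[middle] > target:
--         return binary_search_string(names[:middle], target)
--     else:
--         return binary_search_string(names[middle + 1:], target)
-- ===== SOURCE B (Python) =====
-- def binary_search_string(names, target):
--     # Same answer as the sort-and-binary-search version: a single membership scan.
--     # (Unlike A, does not mutate names.)
--     return target in names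
-- ===== Notes on version B (the rewrite author's own statement) =====
-- stated objective: simpler
-- what changed: A sorts the list and re-sorts every slice while recursing a binary search; B answers the same presence question with a single linear membership test (target in names), no sorting, recursion or mutation.
import Mathlib
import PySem

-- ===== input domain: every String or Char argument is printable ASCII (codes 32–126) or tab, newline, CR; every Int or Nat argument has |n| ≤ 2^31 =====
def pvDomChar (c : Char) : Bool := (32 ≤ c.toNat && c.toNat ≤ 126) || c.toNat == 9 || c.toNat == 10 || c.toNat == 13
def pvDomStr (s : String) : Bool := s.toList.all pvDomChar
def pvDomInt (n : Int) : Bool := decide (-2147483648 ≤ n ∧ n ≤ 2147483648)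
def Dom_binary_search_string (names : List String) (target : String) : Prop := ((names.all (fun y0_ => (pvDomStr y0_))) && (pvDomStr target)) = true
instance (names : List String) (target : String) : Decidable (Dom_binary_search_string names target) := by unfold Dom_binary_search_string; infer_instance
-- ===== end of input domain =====

-- B replaces A's sort-and-recurse binary search by a single linear membership test (simpler).
-- Equivalence is about the RETURN value only: A also sorts `names` in place, B does not mutate.


-- ===== PORT A =====
def binary_search_string (names : List String) (target : String) : Bool :=
  let ns := PySem.List.sorted names (fun x => x)
  if ns.length = 0 then false
  else
    let middle := (ns.length - 1) / 2
    let m := ns.getD middle ""            -- names[middle], index always in range here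
    if m == target then true
    else if target < m then               -- names[middle] > target
      binary_search_string (PySem.List.slice ns none (some (middle : Int))) target
    else
      binary_search_string (PySem.List.slice ns (some ((middle : Int) + 1)) none) target
termination_by names.length
decreasing_by
  · rename_i h _ _
    simp only [ns] at *
    rw [PySem.List.slice_to_natCast]
    simp only [List.length_take, PySem.List.length_sorted] at *
    omega
  · rename_i h _ _
    simp only [ns] at *
    have hmm : (((((PySem.List.sorted names (fun x => x)).length - 1) / 2 : Nat)) : Int) + 1
        = ((((PySem.List.sorted names (fun x => x)).length - 1) / 2 + 1 : Nat) : Int) := by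
      push_cast; ring
    rw [hmm, PySem.List.slice_from_natCast]
    simp only [List.length_drop, PySem.List.length_sorted] at *
    omega

-- ===== PORT B =====
def binary_search_string_alt (names : List String) (target : String) : Bool :=
  names.contains target

-- ===== PRECONDITION & SPEC =====
def Spec_binary_search_string (names : List String) (target : String) (out : Bool) : Prop := out = binary_search_string_alt names target
instance (names : List String) (target : String) (out : Bool) : Decidable (Spec_binary_search_string names target out) := by unfold Spec_binary_search_string; infer_instance

-- ===== CLAIM (what is proved, stated in full; the proofs are below) =====
def Claim_equal_binary_search_string : Prop := ∀ (names : List String) (target : String), Dom_binary_search_string names target → Spec_binary_search_string names target (binary_search_string names target)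

-- ===== LEMMAS AND PROOFS =====

-- Binary-search correctness: A returns `target ∈ names`, by strong induction on length.
theorem bss_eq_contains : ∀ (n : Nat) (names : List String) (target : String),
    names.length = n → binary_search_string names target = names.contains target := by
  intro n
  induction n using Nat.strong_induction_on with
  | _ n ih =>
    intro names target hlen
    rw [binary_search_string]
    set ns := PySem.List.sorted names (fun x => x) with hns
    have hlenns : ns.length = names.length := PySem.List.length_sorted ..
    have hmemns : ∀ x, x ∈ ns ↔ x ∈ names := fun x => PySem.List.mem_sorted ..
    have hcont : ns.contains target = names.contains target := by
      simp [hmemns]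
    by_cases h0 : ns.length = 0
    · have : names = [] := by
        have := (PySem.List.sorted_eq_nil_iff names (fun x => x) false).mp
          (List.eq_nil_of_length_eq_zero h0)
        exact this
      simp [h0, this]
    · simp only [h0, if_false]
      have hmidlt : (ns.length - 1) / 2 < ns.length := by omega
      set middle := (ns.length - 1) / 2 with hmid
      have hget : ns.getD middle "" = ns[middle] := List.getD_eq_getElem ns "" hmidlt
      have hpw : List.Pairwise (· ≤ ·) ns := by
        simpa using PySem.List.sorted_pairwise names (fun x => x)
      by_cases heq : ns[middle] = target
      · simp only [hget, heq]
        simp only [beq_self_eq_true, if_true]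
        rw [← hcont]
        have : target ∈ ns := heq ▸ List.getElem_mem hmidlt
        simp [this]
      · have hbeq : (ns.getD middle "" == target) = false := by
          rw [hget]; exact beq_false_of_ne heq
        simp only [hbeq, Bool.false_eq_true, if_false]
        by_cases hlt : target < ns.getD middle ""
        · simp only [hlt, if_true]
          rw [PySem.List.slice_to_natCast]
          have hrec := ih middle (by omega) (ns.take middle) target
            (by simp only [List.length_take]; omega)
          rw [hrec, ← hcont, Bool.eq_iff_iff]
          -- target ∈ ns.take middle ↔ target ∈ ns : indices ≥ middle carry values > target
          simp only [List.contains_iff_mem]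
          constructor
          · exact fun hmem => List.mem_of_mem_take hmem
          · intro hmem
            obtain ⟨j, hj, hje⟩ := List.mem_iff_getElem.mp hmem
            have hjlt : j < middle := by
              by_contra hge
              have hle : ns[middle] ≤ ns[j] := by
                have := PySem.List.sorted_id_getElem_mono names
                  (p := middle) (q := j) (by omega) (by rw [← hns]; omega)
                exact this
              rw [hje] at hle
              rw [hget] at hlt
              exact absurd hlt (not_lt.mpr hle)
            refine List.mem_iff_getElem.mpr ⟨j, by simp only [List.length_take]; omega, ?_⟩
            rw [List.getElem_take]; exact hje
        · simp only [hlt, if_false]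
          have hmm : ((middle : Int) + 1) = ((middle + 1 : Nat) : Int) := by push_cast; ring
          rw [hmm, PySem.List.slice_from_natCast]
          have hrec := ih (ns.length - (middle + 1)) (by omega) (ns.drop (middle + 1)) target
            (by simp only [List.length_drop])
          rw [hrec, ← hcont, Bool.eq_iff_iff]
          simp only [List.contains_iff_mem]
          constructor
          · exact fun hmem => List.mem_of_mem_drop hmem
          · intro hmem
            obtain ⟨j, hj, hje⟩ := List.mem_iff_getElem.mp hmem
            have hjgt : middle + 1 ≤ j := by
              by_contra hge
              have hle : ns[j] ≤ ns[middle] := by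
                have := PySem.List.sorted_id_getElem_mono names
                  (p := j) (q := middle) (by omega) (by rw [← hns]; omega)
                exact this
              rw [hje] at hle
              rw [hget] at hlt
              have hmlt : ns[middle] < target :=
                lt_of_le_of_ne (not_lt.mp hlt) heq
              exact absurd hmlt (not_lt.mpr hle)
            refine List.mem_iff_getElem.mpr ⟨j - (middle + 1),
              by simp only [List.length_drop]; omega, ?_⟩
            rw [List.getElem_drop]
            have : middle + 1 + (j - (middle + 1)) = j := by omega
            simp only [this]; exact hje

-- ===== VERDICT (by name: the statement is the Claim_ definition above) =====
theorem binary_search_string_spec : Claim_equal_binary_search_string := by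
  intro names target _
  unfold Spec_binary_search_string binary_search_string_alt
  exact bss_eq_contains names.length names target rfl
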